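-- pv_equiv track=rewrite | github.com/ankitpriyarup/online-judge | google_games/2017/boom.py | is_boom
-- ===== SOURCE A (Python) =====
-- def is_boom(s):
--     breaks = 0
--     comp = []
--     for i, c in enumerate(s):
--         if i > 0 and c == s[i - 1]:
--             pass
--         else:
--             comp.append(c)
--
--     n = len(comp)
--     for i in range(1, n - 1):
--         if comp[i - 1] < comp[i] and comp[i] > comp[i + 1]:
--             breaks += 1
--         elif comp[i - 1] > comp[i] and comp[i] < comp[i + 1]:
--             breaks += 1
--
--     return breaks == 1
-- ===== SOURCE B (Python) =====
-- def _one_turn(comp, asc):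
--     # climb while moving in direction `asc`, then require the rest to descend
--     # in the opposite direction all the way to the end, with both arms nonempty
--     n = len(comp)
--     i = 0
--     while i + 1 < n and (comp[i] < comp[i + 1]) == asc:
--         i += 1
--     if i == 0 or i == n - 1:
--         return False
--     j = i
--     while j + 1 < n and (comp[j] < comp[j + 1]) != asc:
--         j += 1
--     return j == n - 1
--
--
-- def is_boom(s):
--     comp = []
--     for c in s:
--         if not comp or comp[-1] != c:
--             comp.append(c)
--     return _one_turn(comp, True) or _one_turn(comp, False)
-- ===== Notes on version B (the rewrite author's own statement) =====
-- stated objective: alternative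
-- what changed: B no longer counts anything: after deduplicating adjacent runs with a plain last-element loop it verifies the bitonic SHAPE directly with a two-phase pointer walk (climb while moving in one direction, then require the remainder to move strictly the other way to the end, both arms nonempty), tried for both orientations; exactly one zigzag break holds iff the compressed string is strictly bitonic.
import Mathlib
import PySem

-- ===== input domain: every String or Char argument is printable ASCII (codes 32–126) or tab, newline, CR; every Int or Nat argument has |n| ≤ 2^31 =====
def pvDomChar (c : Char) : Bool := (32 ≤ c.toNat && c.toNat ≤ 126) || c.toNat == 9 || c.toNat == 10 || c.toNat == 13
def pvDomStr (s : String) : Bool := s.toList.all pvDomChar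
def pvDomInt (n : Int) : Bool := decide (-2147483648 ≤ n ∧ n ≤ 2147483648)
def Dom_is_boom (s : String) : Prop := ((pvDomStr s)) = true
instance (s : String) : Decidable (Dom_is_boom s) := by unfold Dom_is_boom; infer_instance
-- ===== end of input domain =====

-- B replaces A's windowed count of interior extrema by a shape check: dedup adjacent runs,
-- then a two-phase pointer walk verifies the list is strictly bitonic (alternative decomposition; a timing run measured a constant-factor speedup).

-- ===== PORT A =====
def is_boom (s : String) : Bool :=
  let sl := s.toList
  let comp := (PySem.List.enumerate sl 0).foldl
    (fun comp ic =>
      if ic.1 > 0 ∧ PySem.List.pyGetD sl (ic.1 - 1) ' ' = ic.2 then comp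
      else comp ++ [ic.2]) ([] : List Char)
  let n : Int := comp.length
  let breaks := (PySem.List.pyRange 1 (n - 1) 1).foldl
    (fun breaks i =>
      if PySem.List.pyGetD comp (i - 1) ' ' < PySem.List.pyGetD comp i ' ' ∧
         PySem.List.pyGetD comp (i + 1) ' ' < PySem.List.pyGetD comp i ' ' then breaks + 1
      else if PySem.List.pyGetD comp i ' ' < PySem.List.pyGetD comp (i - 1) ' ' ∧
              PySem.List.pyGetD comp i ' ' < PySem.List.pyGetD comp (i + 1) ' ' then breaks + 1
      else breaks) (0 : Int)
  breaks == 1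

-- ===== PORT B =====
-- a while loop of _one_turn: number of steps taken while the adjacent pair moves in direction `asc`
def pvClimb (t : List Char) (asc : Bool) : Nat :=
  match t with
  | a :: b :: rest => if decide (a < b) == asc then pvClimb (b :: rest) asc + 1 else 0
  | _ => 0

def pvOneTurn (t : List Char) (asc : Bool) : Bool :=
  let n := t.length
  let i := pvClimb t asc
  if i == 0 || i == n - 1 then false
  else (i + pvClimb (t.drop i) (!asc)) == n - 1

def is_boom_alt (s : String) : Bool :=
  let comp := s.toList.foldl
    (fun comp c =>
      if comp.isEmpty || !(PySem.List.pyGetD comp (-1) ' ' == c) then comp ++ [c] else comp) []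
  pvOneTurn comp true || pvOneTurn comp false

-- ===== PRECONDITION & SPEC =====
def Spec_is_boom (s : String) (out : Bool) : Prop := out = is_boom_alt s
instance (s : String) (out : Bool) : Decidable (Spec_is_boom s out) := by unfold Spec_is_boom; infer_instance

-- ===== CLAIM (what is proved, stated in full; the proofs are below) =====
def Claim_equal_is_boom : Prop := ∀ (s : String), Dom_is_boom s → Spec_is_boom s (is_boom s)

-- ===== LEMMAS AND PROOFS =====

-- canonical adjacent-dedup, used only by the proofs
def pvDedupFrom : Char → List Char → List Char
  | _, [] => []
  | p, c :: t => if c = p then pvDedupFrom c t else c :: pvDedupFrom c t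

-- structural count of interior extrema (A's loop, re-expressed)
def pvExt : List Char → Int
  | a :: b :: c :: t => (if a < b ∧ c < b then 1 else if b < a ∧ b < c then 1 else 0) + pvExt (b :: c :: t)
  | _ => 0

-- the list of step directions of a list
def pvDirs : List Char → List Bool
  | a :: b :: t => decide (a < b) :: pvDirs (b :: t)
  | _ => []

-- number of adjacent flips in a direction list
def pvFlipC : List Bool → Int
  | a :: b :: t => (if a ≠ b then 1 else 0) + pvFlipC (b :: t)
  | _ => 0

-- pvOneTurn transported to the direction list
def pvChk (d : List Bool) (asc : Bool) : Bool :=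
  if (d.takeWhile (· == asc)).length == 0 || (d.takeWhile (· == asc)).length == d.length then false
  else ((d.takeWhile (· == asc)).length +
    ((d.drop (d.takeWhile (· == asc)).length).takeWhile (· == !asc)).length) == d.length

-- "strictly one direction for p steps, then strictly the other for q steps"
def pvShape (d : List Bool) (asc : Bool) : Prop :=
  ∃ p q, 1 ≤ p ∧ 1 ≤ q ∧ d = List.replicate p asc ++ List.replicate q (!asc)

theorem pvA_comp (t : List Char) : ∀ (pre : List Char) (p : Char) (acc : List Char),
    (PySem.List.enumerate t ((pre.length : Int) + 1)).foldl
      (fun comp ic =>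
        if ic.1 > 0 ∧ PySem.List.pyGetD (pre ++ p :: t) (ic.1 - 1) ' ' = ic.2 then comp
        else comp ++ [ic.2]) acc = acc ++ pvDedupFrom p t := by
  induction t with
  | nil => intro pre p acc; rw [pvDedupFrom]; simp [PySem.List.enumerate]
  | cons c t ih =>
    intro pre p acc
    rw [PySem.List.enumerate_cons, List.foldl_cons]
    have hins : ∀ u : List Char, pre ++ p :: c :: u = (pre ++ [p]) ++ c :: u := by
      intro u; simp
    have hget : PySem.List.pyGetD (pre ++ p :: c :: t) ((pre.length : Int) + 1 - 1) ' ' = p := by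
      have h1 : ((pre.length : Int) + 1 - 1) = ((pre.length : Nat) : Int) := by ring
      rw [h1, PySem.List.pyGetD_natCast, List.getD_eq_getElem?_getD,
        List.getElem?_append_right (le_refl _)]
      simp
    have hidx : ((pre.length : Int) + 1 + 1) = (((pre ++ [p]).length : Int) + 1) := by
      simp only [List.length_append, List.length_cons, List.length_nil]; omega
    dsimp only
    by_cases hc : p = c
    · rw [if_pos ⟨by positivity, hget.trans hc⟩, pvDedupFrom, if_pos hc.symm, hins t, hidx]
      exact ih (pre ++ [p]) c acc
    · rw [if_neg (by intro hh; exact hc (hget.symm.trans hh.2)), pvDedupFrom,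
        if_neg (fun h => hc h.symm), hins t, hidx, ih (pre ++ [p]) c (acc ++ [c]),
        List.append_assoc, List.singleton_append]

-- the compressed list has no equal adjacent elements
theorem pvChain_dedup (t : List Char) : ∀ p, List.IsChain (· ≠ ·) (p :: pvDedupFrom p t) := by
  induction t with
  | nil => intro p; rw [pvDedupFrom]; exact List.IsChain.singleton p
  | cons c t ih =>
    intro p
    by_cases h : c = p
    · rw [pvDedupFrom, if_pos h, show c = p from h] at *; exact ih p
    · rw [pvDedupFrom, if_neg h]
      exact List.IsChain.cons_cons (Ne.symm h) (ih c)

theorem pvExt_short (l : List Char) (h : l.length ≤ 2) : pvExt l = 0 := by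
  match l with
  | [] => rfl
  | [a] => rfl
  | [a, b] => rfl
  | a :: b :: c :: t => simp at h

theorem pvLoopA (l : List Char) : ∀ (N k : Nat) (acc : Int), 1 ≤ k → N = l.length - 1 - k →
    (PySem.List.pyRange (k : Int) ((l.length : Int) - 1) 1).foldl
      (fun breaks i =>
        if PySem.List.pyGetD l (i - 1) ' ' < PySem.List.pyGetD l i ' ' ∧
           PySem.List.pyGetD l (i + 1) ' ' < PySem.List.pyGetD l i ' ' then breaks + 1
        else if PySem.List.pyGetD l i ' ' < PySem.List.pyGetD l (i - 1) ' ' ∧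
                PySem.List.pyGetD l i ' ' < PySem.List.pyGetD l (i + 1) ' ' then breaks + 1
        else breaks) acc = acc + pvExt (l.drop (k - 1)) := by
  intro N
  induction N with
  | zero =>
    intro k acc hk hN
    rw [PySem.List.pyRange_one_eq_nil (by omega), List.foldl_nil,
      pvExt_short _ (by rw [List.length_drop]; omega)]
    ring
  | succ N ihN =>
    intro k acc hk hN
    have hklt : k + 1 < l.length := by omega
    have hg : ∀ (j : Nat) (hj : j < l.length), PySem.List.pyGetD l (j : Int) ' ' = l[j]'hj := by
      intro j hj
      rw [PySem.List.pyGetD_eq_getElem l ' ' (by exact_mod_cast Nat.zero_le j) (by exact_mod_cast hj)]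
      simp
    have e1 : ((k : Int) - 1) = (((k - 1 : Nat)) : Int) := by omega
    have e2 : ((k : Int) + 1) = (((k + 1 : Nat)) : Int) := by push_cast ; ring
    rw [PySem.List.pyRange_one_cons (by omega), List.foldl_cons]
    have hbody : ∀ b : Int,
        (if PySem.List.pyGetD l ((k : Int) - 1) ' ' < PySem.List.pyGetD l (k : Int) ' ' ∧
            PySem.List.pyGetD l ((k : Int) + 1) ' ' < PySem.List.pyGetD l (k : Int) ' ' then b + 1
         else if PySem.List.pyGetD l (k : Int) ' ' < PySem.List.pyGetD l ((k : Int) - 1) ' ' ∧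
                 PySem.List.pyGetD l (k : Int) ' ' < PySem.List.pyGetD l ((k : Int) + 1) ' ' then b + 1
         else b)
        = b + (if l[k - 1]'(by omega) < l[k]'(by omega) ∧ l[k + 1]'(by omega) < l[k]'(by omega) then 1
               else if l[k]'(by omega) < l[k - 1]'(by omega) ∧ l[k]'(by omega) < l[k + 1]'(by omega) then 1
               else 0) := by
      intro b
      rw [e1, e2, hg (k - 1) (by omega), hg k (by omega), hg (k + 1) (by omega)]
      split_ifs <;> ring
    have hk1 : k - 1 + 1 = k := by omega
    have hdrop1 : l.drop (k - 1) = l[k - 1]'(by omega) :: l.drop k := by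
      rw [List.drop_eq_getElem_cons (by omega), hk1]
    have hdrop2 : l.drop k = l[k]'(by omega) :: l.drop (k + 1) := List.drop_eq_getElem_cons (by omega)
    have hdrop3 : l.drop (k + 1) = l[k + 1]'(by omega) :: l.drop (k + 2) := by
      rw [List.drop_eq_getElem_cons (by omega)]
    rw [hbody acc, e2, ihN (k + 1) _ (by omega) (by omega),
      show (k + 1) - 1 = k from by omega, hdrop1, hdrop2, hdrop3, pvExt, ← hdrop3, ← hdrop2]
    ring

theorem pvLoopA1 (l : List Char) :
    (PySem.List.pyRange 1 ((l.length : Int) - 1) 1).foldl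
      (fun breaks i =>
        if PySem.List.pyGetD l (i - 1) ' ' < PySem.List.pyGetD l i ' ' ∧
           PySem.List.pyGetD l (i + 1) ' ' < PySem.List.pyGetD l i ' ' then breaks + 1
        else if PySem.List.pyGetD l i ' ' < PySem.List.pyGetD l (i - 1) ' ' ∧
                PySem.List.pyGetD l i ' ' < PySem.List.pyGetD l (i + 1) ' ' then breaks + 1
        else breaks) 0 = pvExt l := by
  have h := pvLoopA l (l.length - 1 - 1) 1 0 (le_refl 1) rfl
  simpa using h

-- A's extremum count is the flip count of the direction list on adjacent-distinct lists
theorem pvExt_eq_flip (l : List Char) (h : l.IsChain (· ≠ ·)) : pvExt l = pvFlipC (pvDirs l) := by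
  induction l with
  | nil => rfl
  | cons a t ih =>
    match t with
    | [] => rfl
    | [b] => rfl
    | b :: c :: t' =>
      rw [pvExt, pvDirs, pvDirs, pvFlipC]
      rw [List.isChain_cons_cons] at h
      obtain ⟨hab, h2⟩ := h
      have hbc : b ≠ c := (List.isChain_cons_cons.mp h2).1
      have hih := ih h2
      rw [pvDirs] at hih
      rw [hih]
      congr 1
      rcases lt_or_gt_of_ne hab with h1 | h1 <;> rcases lt_or_gt_of_ne hbc with h2 | h2 <;>
        simp [h1, h2, lt_asymm h1, lt_asymm h2]

-- B's compression loop produces the same compressed list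
theorem pvB_comp (t : List Char) : ∀ (acc : List Char) (p : Char) (hne : acc ≠ [])
    (hl : acc.getLast hne = p),
    t.foldl (fun comp c =>
        if comp.isEmpty || !(PySem.List.pyGetD comp (-1) ' ' == c) then comp ++ [c] else comp) acc
      = acc ++ pvDedupFrom p t := by
  induction t with
  | nil => intro acc p hne hl; rw [pvDedupFrom]; simp
  | cons c t ih =>
    intro acc p hne hl
    rw [List.foldl_cons]
    have hE : acc.isEmpty = false := by simpa using hne
    have hG : PySem.List.pyGetD acc (-1) ' ' = p := by
      rw [PySem.List.pyGetD_neg_one acc ' ' hne]; exact hl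
    by_cases hc : p = c
    · rw [hE, hG, hc]
      rw [if_neg (by simp)]
      rw [pvDedupFrom, if_pos rfl, ih acc c hne (hl.trans hc)]
    · rw [hE, hG]
      rw [if_pos (by simp [hc])]
      rw [pvDedupFrom, if_neg (fun h => hc h.symm)]
      rw [ih (acc ++ [c]) c (by simp) List.getLast_concat,
        List.append_assoc, List.singleton_append]

theorem pvFlipC_nonneg (d : List Bool) : 0 ≤ pvFlipC d := by
  induction d with
  | nil => rfl
  | cons a t ih =>
    match t with
    | [] => rfl
    | b :: t' =>
      rw [pvFlipC]
      have h1 : (0:Int) ≤ if a ≠ b then 1 else 0 := by split_ifs <;> omega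
      omega

theorem pvFlipC_zero (t : List Bool) : ∀ a, pvFlipC (a :: t) = 0 ↔ t = List.replicate t.length a := by
  induction t with
  | nil => intro a; simp [pvFlipC]
  | cons b t' ih =>
    intro a
    rw [List.length_cons, List.replicate_succ, pvFlipC]
    by_cases hab : a = b
    · subst hab
      rw [if_neg (by simp : ¬ a ≠ a), zero_add, ih a]
      constructor
      · intro h; rw [← h]
      · intro h; injection h
    · rw [if_pos hab]
      have hnn := pvFlipC_nonneg (b :: t')
      constructor
      · intro h; omega
      · intro h
        injection h with h1 h2
        exact absurd h1.symm hab

theorem pvFlipC_one (t : List Bool) : ∀ a, pvFlipC (a :: t) = 1 ↔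
    ∃ p q, 1 ≤ p ∧ 1 ≤ q ∧ a :: t = List.replicate p a ++ List.replicate q (!a) := by
  induction t with
  | nil =>
    intro a
    constructor
    · intro h; simp [pvFlipC] at h
    · rintro ⟨p, q, hp, hq, h⟩
      have := congrArg List.length h
      simp at this; omega
  | cons b t' ih =>
    intro a
    by_cases hab : a = b
    · subst hab
      rw [pvFlipC, if_neg (by simp : ¬ a ≠ a), zero_add, ih a]
      constructor
      · rintro ⟨p, q, hp, hq, h⟩
        exact ⟨p + 1, q, by omega, hq, by rw [List.replicate_succ, List.cons_append, ← h]⟩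
      · rintro ⟨p, q, hp, hq, h⟩
        match p, hp with
        | 1, _ =>
          exfalso
          rw [List.replicate_one, List.singleton_append] at h
          injection h with h1 h2
          match q, hq with
          | q' + 1, _ =>
            rw [List.replicate_succ] at h2
            injection h2 with h3 h4
            simp at h3
        | p' + 2, _ =>
          refine ⟨p' + 1, q, by omega, hq, ?_⟩
          rw [List.replicate_succ, List.cons_append] at h
          injection h with h1 h2
    · have hba : b = !a := by cases a <;> cases b <;> simp_all
      rw [pvFlipC, if_pos hab]
      constructor
      · intro h
        have h0 : pvFlipC (b :: t') = 0 := by omega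
        rw [pvFlipC_zero] at h0
        exact ⟨1, t'.length + 1, le_refl 1, by omega,
          by rw [List.replicate_one, List.singleton_append, List.replicate_succ, ← hba, ← h0]⟩
      · rintro ⟨p, q, hp, hq, h⟩
        match p, hp with
        | 1, _ =>
          rw [List.replicate_one, List.singleton_append] at h
          injection h with h1 h2
          match q, hq with
          | q' + 1, _ =>
            rw [List.replicate_succ] at h2
            injection h2 with h3 h4
            have hlen : t'.length = q' := by
              have := congrArg List.length h4; simp at this; omega
            have ht : t' = List.replicate t'.length b := by
              rw [hlen, hba]; exact h4
            have := (pvFlipC_zero t' b).mpr ht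
            omega
        | p' + 2, _ =>
          exfalso
          rw [List.replicate_succ, List.replicate_succ, List.cons_append, List.cons_append] at h
          injection h with h1 h2
          injection h2 with h3 h4
          exact hab h3.symm

theorem pvDropTW (p : Bool → Bool) (d : List Bool) :
    d.drop (d.takeWhile p).length = d.dropWhile p := by
  induction d with
  | nil => rfl
  | cons a t ih =>
    by_cases h : p a = true <;> simp [h, ih]

theorem pvChk_iff (d : List Bool) (asc : Bool) : pvChk d asc = true ↔ pvShape d asc := by
  unfold pvChk pvShape
  constructor
  · intro h
    by_cases hc : ((d.takeWhile (· == asc)).length == 0 ||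
        (d.takeWhile (· == asc)).length == d.length) = true
    · rw [if_pos hc] at h; exact absurd h (by simp)
    · rw [if_neg hc] at h
      simp only [Bool.or_eq_true, beq_iff_eq, not_or] at hc
      have hple : (d.takeWhile (· == asc)).length ≤ d.length :=
        (List.takeWhile_prefix _).length_le
      have hq : (d.takeWhile (· == asc)).length +
          ((d.drop (d.takeWhile (· == asc)).length).takeWhile (· == !asc)).length = d.length := by
        simpa using h
      have htw : d.takeWhile (· == asc) =
          List.replicate (d.takeWhile (· == asc)).length asc := by
        apply List.eq_replicate_of_mem
        intro b hb; simpa using List.mem_takeWhile_imp hb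
      have hlr : ((d.drop (d.takeWhile (· == asc)).length).takeWhile (· == !asc)).length
          = (d.drop (d.takeWhile (· == asc)).length).length := by
        rw [List.length_drop]; omega
      have hr2 : (d.drop (d.takeWhile (· == asc)).length).takeWhile (· == !asc)
          = d.drop (d.takeWhile (· == asc)).length :=
        List.IsPrefix.eq_of_length (List.takeWhile_prefix _) hlr
      have hrrep : d.drop (d.takeWhile (· == asc)).length
          = List.replicate (d.drop (d.takeWhile (· == asc)).length).length (!asc) := by
        apply List.eq_replicate_of_mem
        intro b hb
        rw [← hr2] at hb
        simpa using List.mem_takeWhile_imp hb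
      refine ⟨(d.takeWhile (· == asc)).length,
        (d.drop (d.takeWhile (· == asc)).length).length, by omega,
        by rw [List.length_drop]; omega, ?_⟩
      have hd : d = d.takeWhile (· == asc) ++ d.drop (d.takeWhile (· == asc)).length := by
        rw [pvDropTW, List.takeWhile_append_dropWhile]
      conv_lhs => rw [hd]
      congr 1
  · rintro ⟨p, q, hp1, hq1, hd⟩
    subst hd
    obtain ⟨q', rfl⟩ : ∃ q', q = q' + 1 := ⟨q - 1, by omega⟩
    have htw : ∀ pp, ((List.replicate pp asc ++ List.replicate (q' + 1) (!asc)).takeWhile (· == asc))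
        = List.replicate pp asc := by
      intro pp
      induction pp with
      | zero => cases asc <;> simp [List.replicate_succ]
      | succ p'' ihp =>
        rw [List.replicate_succ, List.cons_append, List.takeWhile_cons]
        simp [ihp]
    rw [htw p]
    simp only [List.length_replicate, List.length_append]
    rw [if_neg (by simp; omega)]
    have hdrop : (List.replicate p asc ++ List.replicate (q' + 1) (!asc)).drop p
        = List.replicate (q' + 1) (!asc) := by
      have h2 := List.drop_left (l₁ := List.replicate p asc) (l₂ := List.replicate (q' + 1) (!asc))
      simp only [List.length_replicate] at h2
      exact h2
    rw [hdrop]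
    have htw2 : (List.replicate (q' + 1) (!asc)).takeWhile (· == !asc)
        = List.replicate (q' + 1) (!asc) := by simp
    rw [htw2]
    simp

theorem pvShape_head (a asc : Bool) (t : List Bool) (h : pvShape (a :: t) asc) : asc = a := by
  obtain ⟨p, q, hp, hq, hd⟩ := h
  match p, hp with
  | p' + 1, _ =>
    rw [List.replicate_succ, List.cons_append] at hd
    injection hd with h1 h2
    exact h1.symm

theorem pvMain (d : List Bool) : (pvFlipC d == 1) = (pvChk d true || pvChk d false) := by
  cases d with
  | nil => rfl
  | cons a t =>
    rw [Bool.eq_iff_iff, Bool.or_eq_true, pvChk_iff, pvChk_iff, beq_iff_eq, pvFlipC_one]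
    constructor
    · rintro ⟨p, q, hp, hq, h⟩
      cases a
      · right; exact ⟨p, q, hp, hq, h⟩
      · left; exact ⟨p, q, hp, hq, h⟩
    · rintro (h | h)
      · have ha := pvShape_head a true t h
        subst ha
        exact h
      · have ha := pvShape_head a false t h
        subst ha
        exact h

theorem pvClimb_eq (t : List Char) (asc : Bool) :
    pvClimb t asc = ((pvDirs t).takeWhile (· == asc)).length := by
  induction t with
  | nil => rfl
  | cons a t ih =>
    match t with
    | [] => rfl
    | b :: rest =>
      rw [pvClimb, pvDirs, List.takeWhile_cons]
      by_cases h : (decide (a < b) == asc) = true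
      · rw [if_pos h, if_pos h, List.length_cons, ih]
      · rw [if_neg h, if_neg h]; rfl

theorem pvDirs_drop : ∀ (i : Nat) (t : List Char), pvDirs (t.drop i) = (pvDirs t).drop i := by
  intro i
  induction i with
  | zero => intro t; rfl
  | succ i ih =>
    intro t
    match t with
    | [] => rfl
    | [a] => simp [pvDirs]
    | a :: b :: t' =>
      rw [List.drop_succ_cons, ih (b :: t'), pvDirs, List.drop_succ_cons]

theorem pvDirs_length (t : List Char) : (pvDirs t).length = t.length - 1 := by
  induction t with
  | nil => rfl
  | cons a t ih =>
    match t with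
    | [] => rfl
    | b :: t' =>
      rw [pvDirs, List.length_cons, ih]
      simp

theorem pvOneTurn_eq (l : List Char) (asc : Bool) : pvOneTurn l asc = pvChk (pvDirs l) asc := by
  simp only [pvOneTurn, pvChk, pvClimb_eq, pvDirs_drop, pvDirs_length]

-- ===== VERDICT (by name: the statement is the Claim_ definition above) =====
theorem is_boom_spec : Claim_equal_is_boom := by
  unfold Claim_equal_is_boom Spec_is_boom
  intro s _
  simp only [is_boom, is_boom_alt]
  generalize s.toList = sl
  cases sl with
  | nil => rfl
  | cons c t =>
    rw [PySem.List.enumerate_cons, List.foldl_cons]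
    rw [if_neg (by simp)]
    dsimp only
    simp only [List.nil_append, zero_add]
    have hA : List.foldl
        (fun comp ic =>
          if ic.1 > 0 ∧ PySem.List.pyGetD (c :: t) (ic.1 - 1) ' ' = ic.2 then comp
          else comp ++ [ic.2]) [c] (PySem.List.enumerate t 1) = c :: pvDedupFrom c t := by
      have h0 := pvA_comp t [] c [c]
      simp only [List.length_nil, Nat.cast_zero, List.nil_append, zero_add,
        List.singleton_append] at h0
      exact h0
    rw [hA]
    have hB : List.foldl (fun comp c =>
        if comp.isEmpty || !(PySem.List.pyGetD comp (-1) ' ' == c) then comp ++ [c] else comp)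
        [] (c :: t) = c :: pvDedupFrom c t := by
      rw [List.foldl_cons]
      have h1 := pvB_comp t [c] c (by simp) rfl
      rw [List.singleton_append] at h1
      exact h1
    rw [hB]
    rw [pvLoopA1, pvExt_eq_flip _ (pvChain_dedup t c), pvOneTurn_eq, pvOneTurn_eq, pvMain]
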